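-- pv_equiv track=rewrite | github.com/happyparsi/DocuCompiler | src/generator.py | _generate_paragraph
-- ===== SOURCE A (Python) =====
-- from typing import List, Dict
--
-- def _generate_paragraph(texts: List[str]) -> str:
--     """
--     Generates a rich paragraph summary with:
--     - A bold ## heading
--     - Content grouped into readable paragraphs (every ~3 sentences)
--     - An italic closing note
--     """
--     if not texts:
--         return ""
--
--     # Group sentences into paragraphs (every 3 sentences)
--     group_size = 3
--     groups = [texts[i:i + group_size] for i in range(0, len(texts), group_size)]
--
--     parts = []
--     parts.append("## 📄 Document Summary\n")
--
--     for idx, group in enumerate(groups):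
--         para = " ".join([t.strip() for t in group])
--         # Ensure paragraph ends with punctuation
--         if para and not para[-1] in '.!?':
--             para += '.'
--         parts.append(para)
--
--     # Closing note
--     parts.append(
--         f"\n---\n*Summary generated from **{len(texts)} key sentences** "
--         f"extracted from the document. Ask a follow-up question below to explore further.*"
--     )
--
--     return "\n\n".join(parts)
-- ===== SOURCE B (Python) =====
-- from typing import List
--
--
-- def _flush(buffer: List[str]) -> str:
--     para = " ".join(buffer)
--     if para and not para[-1] in '.!?':
--         para += '.'
--     return para
--
--
-- def _generate_paragraph(texts: List[str]) -> str:
--     if not texts: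
--         return ""
--
--     parts = ["## 📄 Document Summary\n"]
--     buffer: List[str] = []
--     for t in texts:
--         buffer.append(t.strip())
--         if len(buffer) == 3:
--             parts.append(_flush(buffer))
--             buffer = []
--     if buffer:
--         parts.append(_flush(buffer))
--
--     parts.append(
--         f"\n---\n*Summary generated from **{len(texts)} key sentences** "
--         f"extracted from the document. Ask a follow-up question below to explore further.*"
--     )
--
--     return "\n\n".join(parts)
-- ===== Notes on version B (the rewrite author's own statement) =====
-- stated objective: alternative
-- what changed: Replaces the precomputed index-slice grouping (range/texts[i:i+3] list of groups, then a second loop) by a single streaming pass that accumulates stripped sentences in a buffer and flushes a paragraph every 3 sentences, with a final flush of the partial buffer.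
import Mathlib
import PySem

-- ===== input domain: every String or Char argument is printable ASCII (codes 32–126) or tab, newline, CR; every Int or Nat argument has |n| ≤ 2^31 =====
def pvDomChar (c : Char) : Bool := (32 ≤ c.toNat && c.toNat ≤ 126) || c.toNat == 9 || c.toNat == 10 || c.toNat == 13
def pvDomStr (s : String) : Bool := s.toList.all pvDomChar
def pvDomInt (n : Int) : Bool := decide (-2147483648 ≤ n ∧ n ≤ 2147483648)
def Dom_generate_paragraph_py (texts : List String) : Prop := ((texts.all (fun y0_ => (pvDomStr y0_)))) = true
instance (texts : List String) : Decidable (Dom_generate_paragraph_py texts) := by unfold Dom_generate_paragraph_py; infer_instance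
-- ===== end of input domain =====

-- B replaces A's index-slice grouping with a single streaming pass over the sentences (same output; no speed claim).

-- ===== PORT A =====
-- the closing note (an f-string in Python)
def pvFooter (n : Int) : String :=
  "\n---\n*Summary generated from **" ++ PySem.Int.toStr n ++
    " key sentences** extracted from the document. Ask a follow-up question below to explore further.*"

def generate_paragraph_py (texts : List String) : String :=
  if texts = [] then ""
  else
    -- groups = [texts[i:i+3] for i in range(0, len(texts), 3)]
    let groups := (PySem.List.pyRange 0 (texts.length : Int) 3).map
      (fun i => PySem.List.slice texts (some i) (some (i + 3)))
    let parts : List String := ["## 📄 Document Summary\n"]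
    let parts := groups.foldl (fun parts group =>
      let para := PySem.Str.join " " (group.map (fun t => PySem.Str.strip t))
      -- if para and not para[-1] in '.!?': para += '.'
      let addDot : Bool :=
        match PySem.Str.pyGet? para (-1) with
        | some c => !(c == '.' || c == '!' || c == '?')
        | none => false   -- para empty: 'para and …' short-circuits to False
      let para := cond addDot (para ++ ".") para
      parts ++ [para]) parts
    let parts := parts ++ [pvFooter (texts.length : Int)]
    PySem.Str.join "\n\n" parts

-- ===== PORT B =====
-- helper _flush of Source B
def pvFlush (buffer : List String) : String :=
  let para := PySem.Str.join " " buffer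
  let addDot : Bool :=
    match PySem.Str.pyGet? para (-1) with
    | some c => !(c == '.' || c == '!' || c == '?')
    | none => false
  cond addDot (para ++ ".") para

-- one iteration of Source B's loop body: state = (parts, buffer)
def pvStep (st : List String × List String) (t : String) : List String × List String :=
  let buffer := st.2 ++ [PySem.Str.strip t]
  if buffer.length = 3 then (st.1 ++ [pvFlush buffer], []) else (st.1, buffer)

def generate_paragraph_py_alt (texts : List String) : String :=
  if texts = [] then ""
  else
    let st := texts.foldl pvStep (["## 📄 Document Summary\n"], [])
    let parts := if st.2 = [] then st.1 else st.1 ++ [pvFlush st.2]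
    PySem.Str.join "\n\n" (parts ++ [pvFooter (texts.length : Int)])

-- ===== PRECONDITION & SPEC =====
def Spec_generate_paragraph_py (texts : List String) (out : String) : Prop := out = generate_paragraph_py_alt texts
instance (texts : List String) (out : String) : Decidable (Spec_generate_paragraph_py texts out) := by unfold Spec_generate_paragraph_py; infer_instance

-- ===== CLAIM (what is proved, stated in full; the proofs are below) =====
def Claim_equal_generate_paragraph_py : Prop := ∀ (texts : List String), Dom_generate_paragraph_py texts → Spec_generate_paragraph_py texts (generate_paragraph_py texts)

-- ===== LEMMAS AND PROOFS =====

-- the groups of 3 consecutive elements, by structural recursion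
def pvChunks {α : Type} : List α → List (List α)
  | [] => []
  | [a] => [[a]]
  | [a, b] => [[a, b]]
  | a :: b :: c :: rest => [a, b, c] :: pvChunks rest

lemma pvChunks_nil {α : Type} : pvChunks ([] : List α) = [] := rfl
lemma pvChunks_one {α : Type} (a : α) : pvChunks [a] = [[a]] := rfl
lemma pvChunks_two {α : Type} (a b : α) : pvChunks [a, b] = [[a, b]] := rfl
lemma pvChunks_cons3 {α : Type} (a b c : α) (rest : List α) :
    pvChunks (a :: b :: c :: rest) = [a, b, c] :: pvChunks rest := rfl

-- range-of-thirds formulation equals pvChunks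
lemma chunkMap {α : Type} (l : List α) :
    (List.range ((l.length + 2) / 3)).map (fun k => (l.drop (3 * k)).take 3) = pvChunks l := by
  induction l using pvChunks.induct with
  | case4 a b c rest ih =>
      have hlen : ((a :: b :: c :: rest).length + 2) / 3 = (rest.length + 2) / 3 + 1 := by
        simp only [List.length_cons]; omega
      rw [hlen, List.range_succ_eq_map, List.map_cons, List.map_map, pvChunks_cons3]
      refine congrArg₂ List.cons (by simp) ?_
      rw [← ih]
      apply List.map_congr_left
      intro k _
      simp only [Function.comp_apply]
      have e1 : 3 * Nat.succ k = (3 * k + 1) + 1 + 1 := by omega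
      rw [e1, List.drop_succ_cons, List.drop_succ_cons, List.drop_succ_cons]
  | case1 => simp [pvChunks]
  | case2 a => simp [pvChunks]
  | case3 a b => simp [pvChunks, List.range_succ]

-- A's comprehension builds exactly pvChunks
lemma groups_eq_chunks (texts : List String) (h : texts ≠ []) :
    (PySem.List.pyRange 0 (texts.length : Int) 3).map
      (fun i => PySem.List.slice texts (some i) (some (i + 3))) = pvChunks texts := by
  rw [PySem.List.pyRange_of_pos 0 (texts.length : Int) (by norm_num)]
  have hpos : (0 : Int) < (texts.length : Int) := by
    have : texts.length ≠ 0 := by simpa using h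
    exact_mod_cast Nat.pos_of_ne_zero this
  rw [if_pos hpos, List.map_map]
  have hn : (((texts.length : Int) - 0 + 3 - 1) / 3).toNat = (texts.length + 2) / 3 := by
    omega
  rw [hn, ← chunkMap texts]
  apply List.map_congr_left
  intro k _
  simp only [Function.comp_apply, zero_add]
  have h1 : (3 : Int) * (k : Int) = ((3 * k : Nat) : Int) := by push_cast; ring
  have h2 : (3 : Int) * (k : Int) + 3 = ((3 * k : Nat) : Int) + ((3 : Nat) : Int) := by push_cast; ring
  rw [h2, h1, PySem.List.slice_natCast_add]

lemma foldl_append_map {α : Type} (f : α → String) :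
    ∀ (l : List α) (parts : List String),
      l.foldl (fun parts g => parts ++ [f g]) parts = parts ++ l.map f := by
  intro l
  induction l with
  | nil => simp
  | cons a t ih => intro parts; simp [ih]

-- B's loop starting with an empty buffer produces one flushed paragraph per chunk
lemma loopB : ∀ (texts parts : List String),
    (if (texts.foldl pvStep (parts, [])).2 = [] then (texts.foldl pvStep (parts, [])).1
     else (texts.foldl pvStep (parts, [])).1 ++ [pvFlush (texts.foldl pvStep (parts, [])).2]) =
    parts ++ (pvChunks texts).map (fun g => pvFlush (g.map PySem.Str.strip)) := by
  intro texts
  induction texts using pvChunks.induct with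
  | case4 a b c rest ih =>
      intro parts
      have hstep : (a :: b :: c :: rest).foldl pvStep (parts, []) =
          rest.foldl pvStep (parts ++ [pvFlush [PySem.Str.strip a, PySem.Str.strip b, PySem.Str.strip c]], []) := by
        simp [pvStep]
      simp only [hstep, pvChunks_cons3, List.map_cons]
      rw [ih (parts ++ [pvFlush [PySem.Str.strip a, PySem.Str.strip b, PySem.Str.strip c]])]
      simp
  | case1 => intro parts; simp [pvChunks_nil]
  | case2 a => intro parts; simp [pvStep, pvChunks_one, pvFlush]
  | case3 a b => intro parts; simp [pvStep, pvChunks_two, pvFlush]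

-- ===== VERDICT (by name: the statement is the Claim_ definition above) =====
theorem generate_paragraph_py_spec : Claim_equal_generate_paragraph_py := by
  intro texts _
  unfold Spec_generate_paragraph_py
  simp only [generate_paragraph_py, generate_paragraph_py_alt]
  by_cases h : texts = []
  · simp [h]
  · simp only [if_neg h]
    rw [groups_eq_chunks texts h, foldl_append_map, loopB texts ["## 📄 Document Summary\n"]]
    simp [pvFlush, List.map_map]
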